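-- pv_equiv track=rewrite | github.com/peechi777/boommouse_slot | boom/boom.py | calc_base
-- ===== SOURCE A (Python) =====
-- def is_wild(sym):
--     return sym in ['WW', 'W1', 'W2', 'W3']
--
-- def calc_base(grid, pay_table):
--     total_win = 0
--     hit_detail = []
--     score_combo = 0
--     cols = len(grid[0])
--
--     for target, payoff in pay_table.items():
--         ways = []
--         for c in range(cols):
--             cnt = 0
--             for r in range(len(grid)):
--                 cell = grid[r][c]
--                 if cell == target or (is_wild(cell) and target != 'C1'):
--                     cnt += 1
--             ways.append(cnt)
--         for n in (5, 4, 3):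
--             if all(w > 0 for w in ways[:n]):
--                 combo = 1
--                 for w in ways[:n]:
--                     combo *= w
--                 score = payoff[n - 1] * combo
--                 if score > 0:
--                     total_win += score
--                     hit_detail.append((target, n, combo, score))
--                     score_combo += 1
--                 break
--     return total_win, hit_detail, score_combo
-- ===== SOURCE B (Python) =====
-- WILDS = ('WW', 'W1', 'W2', 'W3')
--
-- def calc_base(grid, pay_table):
--     columns = list(zip(*grid))
--     counts = []
--     wilds = []
--     for col in columns:
--         d = {}
--         w = 0
--         for cell in col:
--             d[cell] = d.get(cell, 0) + 1
--             if cell in WILDS: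
--                 w += 1
--         counts.append(d)
--         wilds.append(w)
--
--     total_win = 0
--     hit_detail = []
--     score_combo = 0
--     for target, payoff in pay_table.items():
--         if target == 'C1':
--             ways = [d.get('C1', 0) for d in counts]
--         elif target in WILDS:
--             ways = list(wilds)
--         else:
--             ways = [d.get(target, 0) + w for d, w in zip(counts, wilds)]
--         for n in (5, 4, 3):
--             prefix = ways[:n]
--             if all(w > 0 for w in prefix):
--                 combo = 1
--                 for w in prefix:
--                     combo *= w
--                 score = payoff[n - 1] * combo
--                 if score > 0:
--                     total_win += score
--                     hit_detail.append((target, n, combo, score))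
--                     score_combo += 1
--                 break
--     return total_win, hit_detail, score_combo
-- ===== Notes on version B (the rewrite author's own statement) =====
-- stated objective: faster
-- what changed: B transposes the grid once with zip(*grid) and builds a per-column symbol-count dict plus wild count, then computes each target's ways by dict lookups (count for C1, wild count for wild targets, count+wilds otherwise) instead of A's rescan of every grid cell for every pay-table entry; the (5,4,3) first-match line loop is kept. Pre_ excludes exactly the inputs on which A raises IndexError (empty grid, a row shorter than the first row when the pay table is non-empty, a payoff list shorter than the line length that fires).
import Mathlib
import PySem

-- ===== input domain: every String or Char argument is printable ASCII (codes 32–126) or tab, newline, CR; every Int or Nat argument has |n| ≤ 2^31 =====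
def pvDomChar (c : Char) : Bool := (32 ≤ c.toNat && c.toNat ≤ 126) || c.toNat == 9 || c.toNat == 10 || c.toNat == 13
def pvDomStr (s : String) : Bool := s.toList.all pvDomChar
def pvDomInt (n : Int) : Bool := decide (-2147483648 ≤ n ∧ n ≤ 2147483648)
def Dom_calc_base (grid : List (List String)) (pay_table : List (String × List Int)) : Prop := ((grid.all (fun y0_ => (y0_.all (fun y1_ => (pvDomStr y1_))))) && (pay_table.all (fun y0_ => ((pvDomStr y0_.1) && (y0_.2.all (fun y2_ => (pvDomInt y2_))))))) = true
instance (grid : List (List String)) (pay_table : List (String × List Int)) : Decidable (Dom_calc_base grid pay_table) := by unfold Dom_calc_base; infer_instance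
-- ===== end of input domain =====

-- B replaces A's per-target rescan of the whole grid by one zip(*grid) transpose with a
-- per-column symbol-count dict + wild count, then per-target lookups (objective: faster);
-- the (5,4,3) line loop is unchanged.

-- ===== PORT A =====
def pvIsWild (sym : String) : Bool := ["WW", "W1", "W2", "W3"].contains sym

-- 'for n in (5, 4, 3): … break' — first n whose ways-prefix is all positive fires, then stop
def pvForN_A (ways payoff : List Int) (target : String)
    (acc : Int × List (String × Int × Int × Int) × Int) :
    List Nat → Int × List (String × Int × Int × Int) × Int
  | [] => acc
  | n :: rest =>
    if (ways.take n).all (fun w => 0 < w) then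
      let combo := (ways.take n).foldl (· * ·) 1
      let score := PySem.List.pyGetD payoff ((n : Int) - 1) 0 * combo
      if 0 < score then
        (acc.1 + score, acc.2.1 ++ [(target, (n : Int), combo, score)], acc.2.2 + 1)
      else acc
    else pvForN_A ways payoff target acc rest

def calc_base (grid : List (List String)) (pay_table : List (String × List Int)) :
    Int × (List (String × Int × Int × Int)) × Int :=
  let cols : Int := PySem.List.len (PySem.List.pyGetD grid 0 [])
  (PySem.Dict.ofList pay_table).items.foldl (fun acc tp =>
    let ways : List Int := (PySem.List.pyRange 0 cols 1).foldl (fun ws c =>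
      let cnt : Int := (PySem.List.pyRange 0 (PySem.List.len grid) 1).foldl (fun cnt r =>
        let cell := PySem.List.pyGetD (PySem.List.pyGetD grid r []) c ""
        if cell = tp.1 ∨ (pvIsWild cell ∧ tp.1 ≠ "C1") then cnt + 1 else cnt) 0
      ws ++ [cnt]) []
    pvForN_A ways tp.2 tp.1 acc [5, 4, 3]) (0, [], 0)

-- ===== PORT B =====
def pvWILDS : List String := ["WW", "W1", "W2", "W3"]

-- Python's zip(*rows) (a standard-library call): tuples up to the shortest row's length
def pvZipStar (rows : List (List String)) : List (List String) :=
  match rows with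
  | [] => []
  | r :: rs =>
    (List.range (rs.foldl (fun m row => min m row.length) r.length)).map
      (fun i => (r :: rs).map (fun row => row.getD i ""))

-- Source B keeps A's (5, 4, 3) first-match line loop, over the looked-up ways
def pvForN_B (ways payoff : List Int) (target : String)
    (acc : Int × List (String × Int × Int × Int) × Int) :
    List Nat → Int × List (String × Int × Int × Int) × Int
  | [] => acc
  | n :: rest =>
    let pre := ways.take n
    if pre.all (fun w => 0 < w) then
      let combo := pre.foldl (· * ·) 1
      let score := PySem.List.pyGetD payoff ((n : Int) - 1) 0 * combo
      if 0 < score then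
        (acc.1 + score, acc.2.1 ++ [(target, (n : Int), combo, score)], acc.2.2 + 1)
      else acc
    else pvForN_B ways payoff target acc rest

def calc_base_alt (grid : List (List String)) (pay_table : List (String × List Int)) :
    Int × (List (String × Int × Int × Int)) × Int :=
  let columns : List (List String) := pvZipStar grid
  let counts : List (PySem.Dict String Int) :=
    columns.map (fun col =>
      col.foldl (fun d cell => d.insert cell (d.getD cell 0 + 1)) PySem.Dict.empty)
  let wilds : List Int :=
    columns.map (fun col =>
      col.foldl (fun w cell => if pvWILDS.contains cell then w + 1 else w) 0)
  (PySem.Dict.ofList pay_table).items.foldl (fun acc tp =>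
    let ways : List Int :=
      if tp.1 = "C1" then counts.map (fun d => d.getD "C1" 0)
      else if pvWILDS.contains tp.1 then wilds
      else (counts.zip wilds).map (fun dw => dw.1.getD tp.1 0 + dw.2)
    pvForN_B ways tp.2 tp.1 acc [5, 4, 3]) (0, [], 0)

-- ===== PRECONDITION & SPEC =====
-- column c of the grid holds a cell matching target t under A's pay rule
def pvColHit (grid : List (List String)) (t : String) (c : Nat) : Prop :=
  ∃ row ∈ grid, (row.getD c "" = t ∨ (row.getD c "" ∈ (["WW", "W1", "W2", "W3"] : List String) ∧ t ≠ "C1"))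
-- a line of length k fires for target t: every checked column has a matching cell
def pvFires (grid : List (List String)) (t : String) (k : Nat) : Prop :=
  ∀ c < min k (grid.headD []).length, pvColHit grid t c
-- Pre_ excludes exactly the inputs where Python A raises IndexError: an empty grid
-- (grid[0]); a row shorter than the first row while the pay table is non-empty
-- (grid[r][c] inside the per-target scan); and a pay-table entry whose line fires at
-- n ∈ {5,4,3} but whose payoff list is shorter than n (payoff[n-1]).
def Pre_calc_base (grid : List (List String)) (pay_table : List (String × List Int)) : Prop :=
  grid ≠ [] ∧
  ((PySem.Dict.ofList pay_table).items ≠ [] →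
    ∀ row ∈ grid, (grid.headD []).length ≤ row.length) ∧
  (∀ p ∈ (PySem.Dict.ofList pay_table).items,
     (pvFires grid p.1 5 → 5 ≤ p.2.length) ∧
     (pvFires grid p.1 4 ∧ ¬ pvFires grid p.1 5 → 4 ≤ p.2.length) ∧
     (pvFires grid p.1 3 ∧ ¬ pvFires grid p.1 4 → 3 ≤ p.2.length))
instance (grid : List (List String)) (pay_table : List (String × List Int)) : Decidable (Pre_calc_base grid pay_table) := by
  haveI : ∀ t k, Decidable (pvFires grid t k) := fun t k => by
    unfold pvFires pvColHit; infer_instance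
  unfold Pre_calc_base
  infer_instance

def pvWitness_calc_base : List (List String) × (List (String × List Int)) :=
  ([["C1", "A2"], ["WW", "A2"]], [("A2", [0, 0, 5, 10, 20])])

def Spec_calc_base (grid : List (List String)) (pay_table : List (String × List Int)) (out : Int × (List (String × Int × Int × Int)) × Int) : Prop := out = calc_base_alt grid pay_table
instance (grid : List (List String)) (pay_table : List (String × List Int)) (out : Int × (List (String × Int × Int × Int)) × Int) : Decidable (Spec_calc_base grid pay_table out) := by unfold Spec_calc_base; infer_instance

-- ===== CLAIM (what is proved, stated in full; the proofs are below) =====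
def Claim_equal_calc_base : Prop := ∀ (grid : List (List String)) (pay_table : List (String × List Int)), Dom_calc_base grid pay_table → Pre_calc_base grid pay_table → Spec_calc_base grid pay_table (calc_base grid pay_table)

-- ===== LEMMAS AND PROOFS =====

-- an Int-accumulator counting fold is countP
theorem foldl_count_int {α : Type} (l : List α) (p : α → Prop) [DecidablePred p] (i : Int) :
    l.foldl (fun cnt x => if p x then cnt + 1 else cnt) i = i + (l.countP (fun x => decide (p x)) : Int) := by
  induction l generalizing i with
  | nil => simp
  | cons a t ih =>
    simp only [List.foldl_cons, List.countP_cons, ih]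
    by_cases hp : p a <;> simp [hp] <;> push_cast <;> ring

-- counting (p ∨ q) splits when p and q never hold together
theorem countP_or_disjoint {α : Type} (l : List α) (p q : α → Bool)
    (h : ∀ x ∈ l, ¬(p x = true ∧ q x = true)) :
    l.countP (fun x => p x || q x) = l.countP p + l.countP q := by
  induction l with
  | nil => rfl
  | cons a t ih =>
    have ha := h a (by simp)
    have ht : ∀ x ∈ t, ¬(p x = true ∧ q x = true) := fun x hx => h x (by simp [hx])
    simp only [List.countP_cons, ih ht]
    cases hp : p a <;> cases hq : q a <;> simp_all <;> omega

-- core: A's row-scan count of one column equals B's dict/wild-count lookups, per target kind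
theorem colcount_eq (col : List String) (t : String) :
    col.foldl (fun cnt cell => if cell = t ∨ (pvIsWild cell ∧ t ≠ "C1") then cnt + 1 else cnt) (0:Int) =
      (if t = "C1" then
         (col.foldl (fun d cell => d.insert cell (d.getD cell 0 + 1)) PySem.Dict.empty).getD "C1" 0
       else if pvWILDS.contains t then
         col.foldl (fun w cell => if pvWILDS.contains cell then w + 1 else w) 0
       else
         (col.foldl (fun d cell => d.insert cell (d.getD cell 0 + 1)) PySem.Dict.empty).getD t 0 +
           col.foldl (fun w cell => if pvWILDS.contains cell then w + 1 else w) 0) := by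
  rw [foldl_count_int, PySem.Dict.getD_foldl_insert_add_one, PySem.Dict.getD_foldl_insert_add_one,
      foldl_count_int]
  simp only [PySem.Dict.getD_empty, zero_add]
  split_ifs with h1 h2
  · subst h1
    have : col.countP (fun cell => decide (cell = "C1" ∨ (pvIsWild cell ∧ ("C1":String) ≠ "C1"))) =
        col.count "C1" := by
      rw [List.count_eq_countP]
      exact List.countP_congr (fun x _ => by simp)
    rw [this]
  · have ht : t ≠ "C1" := by
      intro rfl_h; subst rfl_h; simp [pvWILDS] at h2
    have hw : pvIsWild t = true := h2
    have : col.countP (fun cell => decide (cell = t ∨ (pvIsWild cell ∧ t ≠ "C1"))) =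
        col.countP (fun cell => pvWILDS.contains cell) := by
      refine List.countP_congr (fun x _ => ?_)
      constructor
      · intro hx
        rcases of_decide_eq_true hx with h | h
        · subst h; exact hw
        · exact h.1
      · intro hx; exact decide_eq_true (Or.inr ⟨hx, ht⟩)
    rw [this]; simp
  · have ht : t ≠ "C1" := h1
    have hnw : pvIsWild t = false := by
      simp only [pvIsWild, pvWILDS] at h2 ⊢
      simpa using h2
    have key : col.countP (fun cell => decide (cell = t ∨ (pvIsWild cell ∧ t ≠ "C1"))) =
        col.count t + col.countP (fun cell => pvWILDS.contains cell) := by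
      rw [List.count_eq_countP]
      have : col.countP (fun cell => decide (cell = t ∨ (pvIsWild cell ∧ t ≠ "C1"))) =
          col.countP (fun cell => (cell == t) || pvWILDS.contains cell) := by
        refine List.countP_congr (fun x _ => ?_)
        simp [ht, pvIsWild, pvWILDS]
      rw [this]
      exact countP_or_disjoint col _ _ (fun x _ ⟨hp, hq⟩ => by
        have : x = t := by simpa using hp
        subst this
        exact absurd hq (by simp [pvIsWild, pvWILDS] at hnw ⊢; exact hnw))
    rw [key]; push_cast; simp

-- A's row-index loop over one column, re-expressed over the materialised column list
theorem ways_col (grid : List (List String)) (c : Int) (t : String) :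
    ((PySem.List.pyRange 0 (PySem.List.len grid) 1).foldl (fun cnt r =>
        if PySem.List.pyGetD (PySem.List.pyGetD grid r []) c "" = t ∨
            (pvIsWild (PySem.List.pyGetD (PySem.List.pyGetD grid r []) c "") ∧ t ≠ "C1")
        then cnt + 1 else cnt) (0:Int)) =
      (if t = "C1" then
         ((grid.map (fun row => PySem.List.pyGetD row c "")).foldl
            (fun d cell => d.insert cell (d.getD cell 0 + 1)) PySem.Dict.empty).getD "C1" 0
       else if pvWILDS.contains t then
         (grid.map (fun row => PySem.List.pyGetD row c "")).foldl
            (fun w cell => if pvWILDS.contains cell then w + 1 else w) 0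
       else
         ((grid.map (fun row => PySem.List.pyGetD row c "")).foldl
            (fun d cell => d.insert cell (d.getD cell 0 + 1)) PySem.Dict.empty).getD t 0 +
           (grid.map (fun row => PySem.List.pyGetD row c "")).foldl
            (fun w cell => if pvWILDS.contains cell then w + 1 else w) 0) := by
  have h1 := PySem.List.foldl_pyRange_zero_pyGetD grid ([] : List String)
    (fun cnt row => if PySem.List.pyGetD row c "" = t ∨
        (pvIsWild (PySem.List.pyGetD row c "") ∧ t ≠ "C1") then cnt + 1 else cnt) (0:Int)
  have h2 := List.foldl_map (f := fun row : List String => PySem.List.pyGetD row c "")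
    (g := fun (cnt : Int) cell => if cell = t ∨ (pvIsWild cell ∧ t ≠ "C1") then cnt + 1 else cnt)
    (l := grid) (init := (0:Int))
  exact h1.trans (h2.symm.trans (colcount_eq _ t))

-- the two (5,4,3) loops are the same loop
theorem pvForN_eq (ways payoff : List Int) (target : String)
    (acc : Int × List (String × Int × Int × Int) × Int) (ns : List Nat) :
    pvForN_A ways payoff target acc ns = pvForN_B ways payoff target acc ns := by
  induction ns generalizing acc with
  | nil => rfl
  | cons n rest ih => simp only [pvForN_A, pvForN_B]; split_ifs <;> simp [ih]

-- min-fold of zip over rows no shorter than the first row is the first row's length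
theorem min_fold_eq (rs : List (List String)) (k : Nat)
    (h : ∀ row ∈ rs, k ≤ row.length) :
    rs.foldl (fun m row => min m row.length) k = k := by
  induction rs with
  | nil => rfl
  | cons a t ih =>
    have : min k a.length = k := Nat.min_eq_left (h a (by simp))
    simp only [List.foldl_cons, this]
    exact ih (fun row hr => h row (by simp [hr]))

-- B's zip(*grid) transpose, on grids whose rows are no shorter than the first row,
-- is exactly A's column-index view of the grid
theorem zipstar_eq (grid : List (List String)) (hne : grid ≠ [])
    (h : ∀ row ∈ grid, (grid.headD []).length ≤ row.length) :
    pvZipStar grid =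
      (PySem.List.pyRange 0 (PySem.List.len (PySem.List.pyGetD grid 0 [])) 1).map
        (fun c => grid.map (fun row => PySem.List.pyGetD row c "")) := by
  obtain ⟨r, rs, rfl⟩ := List.exists_cons_of_ne_nil hne
  have hlen : ∀ row ∈ rs, r.length ≤ row.length := by
    intro row hr; exact h row (by simp [hr])
  have hz : pvZipStar (r :: rs) =
      (List.range (rs.foldl (fun m row => min m row.length) r.length)).map
        (fun i => (r :: rs).map (fun row => row.getD i "")) := rfl
  rw [hz, min_fold_eq rs r.length hlen]
  rw [PySem.List.pyRange_one]
  simp only [PySem.List.pyGetD_zero_cons, PySem.List.len, List.map_map]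
  have : ((r.length : Int) - 0).toNat = r.length := by omega
  rw [this]
  refine List.map_congr_left (fun k _ => ?_)
  simp [PySem.List.pyGetD_natCast]

theorem calc_base_eq (grid : List (List String)) (pay_table : List (String × List Int))
    (hpre : Pre_calc_base grid pay_table) :
    calc_base grid pay_table = calc_base_alt grid pay_table := by
  obtain ⟨hne, hrect, -⟩ := hpre
  unfold calc_base calc_base_alt
  by_cases hit : (PySem.Dict.ofList pay_table).items = []
  · rw [hit]; simp
  · rw [zipstar_eq grid hne (hrect hit)]
    simp only [List.map_map, List.zip_map']
    congr 1
    funext acc tp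
    rw [pvForN_eq]
    congr 1
    rw [PySem.List.foldl_append_singleton_eq_map]
    simp only [List.nil_append]
    by_cases hC : tp.1 = "C1"
    · rw [if_pos hC]
      refine List.map_congr_left (fun c _ => ?_)
      have := ways_col grid c tp.1
      rw [if_pos hC] at this
      simpa [hC] using this
    · rw [if_neg hC]
      by_cases hW : pvWILDS.contains tp.1
      · rw [if_pos hW]
        refine List.map_congr_left (fun c _ => ?_)
        have := ways_col grid c tp.1
        rw [if_neg hC, if_pos hW] at this
        exact this
      · rw [if_neg hW]
        refine List.map_congr_left (fun c _ => ?_)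
        have := ways_col grid c tp.1
        rw [if_neg hC, if_neg hW] at this
        exact this

-- ===== VERDICT (by name: the statement is the Claim_ definition above) =====
theorem calc_base_spec : Claim_equal_calc_base := by
  intro grid pay_table _ hpre
  unfold Spec_calc_base
  exact calc_base_eq grid pay_table hpre
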